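-- pv_equiv track=rewrite | github.com/Regenshire/iMomir | app.py | build_type_flags
-- ===== SOURCE A (Python) =====
-- TYPE_FLAG_MAP = {
--     "Creature": "is_creature",
--     "Artifact": "is_artifact",
--     "Enchantment": "is_enchantment",
--     "Instant": "is_instant",
--     "Land": "is_land",
--     "Sorcery": "is_sorcery",
--     "Planeswalker": "is_planeswalker",
--     "Battle": "is_battle",
--     "Conspiracy": "is_conspiracy",
--     "Dungeon": "is_dungeon",
--     "Emblem": "is_emblem",
--     "Phenomenon": "is_phenomenon",
--     "Plane": "is_plane",
--     "Scheme": "is_scheme",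
--     "Vanguard": "is_vanguard",
-- }
--
-- def safe_list(value):
--     if isinstance(value, list):
--         return value
--     return []
--
-- def build_type_flags(card_types):
--     flags = {
--         "is_creature": 0,
--         "is_artifact": 0,
--         "is_enchantment": 0,
--         "is_instant": 0,
--         "is_land": 0,
--         "is_sorcery": 0,
--         "is_planeswalker": 0,
--         "is_battle": 0,
--         "is_conspiracy": 0,
--         "is_dungeon": 0,
--         "is_emblem": 0,
--         "is_phenomenon": 0,
--         "is_plane": 0,
--         "is_scheme": 0,
--         "is_vanguard": 0,
--     }
--
--     for card_type in safe_list(card_types):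
--         flag_name = TYPE_FLAG_MAP.get(card_type)
--         if flag_name:
--             flags[flag_name] = 1
--
--     return flags
-- ===== SOURCE B (Python) =====
-- TYPE_FLAG_MAP = {
--     "Creature": "is_creature",
--     "Artifact": "is_artifact",
--     "Enchantment": "is_enchantment",
--     "Instant": "is_instant",
--     "Land": "is_land",
--     "Sorcery": "is_sorcery",
--     "Planeswalker": "is_planeswalker",
--     "Battle": "is_battle",
--     "Conspiracy": "is_conspiracy",
--     "Dungeon": "is_dungeon",
--     "Emblem": "is_emblem",
--     "Phenomenon": "is_phenomenon",
--     "Plane": "is_plane",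
--     "Scheme": "is_scheme",
--     "Vanguard": "is_vanguard",
-- }
--
-- def safe_list(value):
--     if isinstance(value, list):
--         return value
--     return []
--
-- def build_type_flags(card_types):
--     present = set(safe_list(card_types))
--     return {flag: (1 if t in present else 0) for t, flag in TYPE_FLAG_MAP.items()}
-- ===== Notes on version B (the rewrite author's own statement) =====
-- stated objective: idiomatic
-- what changed: B replaces A's initialize-then-mutate dict and loop over the input list with a single dict comprehension over the fixed TYPE_FLAG_MAP testing membership in set(card_types), inverting the traversal direction.
import Mathlib
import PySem

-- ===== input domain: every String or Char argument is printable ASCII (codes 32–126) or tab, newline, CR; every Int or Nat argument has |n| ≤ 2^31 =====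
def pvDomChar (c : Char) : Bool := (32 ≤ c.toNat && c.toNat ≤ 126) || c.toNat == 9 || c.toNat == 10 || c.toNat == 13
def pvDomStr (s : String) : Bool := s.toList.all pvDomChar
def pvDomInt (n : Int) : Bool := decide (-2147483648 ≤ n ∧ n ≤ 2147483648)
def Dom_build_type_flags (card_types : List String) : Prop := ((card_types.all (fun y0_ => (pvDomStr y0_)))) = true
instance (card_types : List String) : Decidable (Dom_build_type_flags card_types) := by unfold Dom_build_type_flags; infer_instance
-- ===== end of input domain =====

-- B replaces A's initialize-then-mutate loop over the input with a single comprehension over the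
-- fixed TYPE_FLAG_MAP testing membership in set(card_types): idiomatic, one pass over the map.

-- ===== PORT A =====
def pvTypeFlagMap : PySem.Dict String String := PySem.Dict.mk [
   ("Creature", "is_creature"),
   ("Artifact", "is_artifact"),
   ("Enchantment", "is_enchantment"),
   ("Instant", "is_instant"),
   ("Land", "is_land"),
   ("Sorcery", "is_sorcery"),
   ("Planeswalker", "is_planeswalker"),
   ("Battle", "is_battle"),
   ("Conspiracy", "is_conspiracy"),
   ("Dungeon", "is_dungeon"),
   ("Emblem", "is_emblem"),
   ("Phenomenon", "is_phenomenon"),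
   ("Plane", "is_plane"),
   ("Scheme", "is_scheme"),
   ("Vanguard", "is_vanguard")]

def pvInitFlags : PySem.Dict String Int := PySem.Dict.mk [
   ("is_creature", 0),
   ("is_artifact", 0),
   ("is_enchantment", 0),
   ("is_instant", 0),
   ("is_land", 0),
   ("is_sorcery", 0),
   ("is_planeswalker", 0),
   ("is_battle", 0),
   ("is_conspiracy", 0),
   ("is_dungeon", 0),
   ("is_emblem", 0),
   ("is_phenomenon", 0),
   ("is_plane", 0),
   ("is_scheme", 0),
   ("is_vanguard", 0)]

-- one loop iteration of A's 'for card_type in safe_list(card_types)' body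
-- (safe_list is the identity here: card_types is always a list under the type convention)
def pvStepA (flags : PySem.Dict String Int) (card_type : String) : PySem.Dict String Int :=
  match pvTypeFlagMap.get? card_type with
  | some flag_name => if flag_name = "" then flags else flags.insert flag_name 1
  | none => flags

def build_type_flags (card_types : List String) : List (String × Int) :=
  (card_types.foldl pvStepA pvInitFlags).items

-- ===== PORT B =====
def pvTypeFlagPairs : List (String × String) := [
   ("Creature", "is_creature"),
   ("Artifact", "is_artifact"),
   ("Enchantment", "is_enchantment"),
   ("Instant", "is_instant"),
   ("Land", "is_land"),
   ("Sorcery", "is_sorcery"),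
   ("Planeswalker", "is_planeswalker"),
   ("Battle", "is_battle"),
   ("Conspiracy", "is_conspiracy"),
   ("Dungeon", "is_dungeon"),
   ("Emblem", "is_emblem"),
   ("Phenomenon", "is_phenomenon"),
   ("Plane", "is_plane"),
   ("Scheme", "is_scheme"),
   ("Vanguard", "is_vanguard")]

def build_type_flags_alt (card_types : List String) : List (String × Int) :=
  let present : PySem.Set String := PySem.Set.ofList card_types
  pvTypeFlagPairs.map (fun p => (p.2, if p.1 ∈ present then (1 : Int) else 0))

-- ===== PRECONDITION & SPEC =====
def Spec_build_type_flags (card_types : List String) (out : List (String × Int)) : Prop := out = build_type_flags_alt card_types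
instance (card_types : List String) (out : List (String × Int)) : Decidable (Spec_build_type_flags card_types out) := by unfold Spec_build_type_flags; infer_instance

-- ===== CLAIM (what is proved, stated in full; the proofs are below) =====
def Claim_equal_build_type_flags : Prop := ∀ (card_types : List String), Dom_build_type_flags card_types → Spec_build_type_flags card_types (build_type_flags card_types)

-- ===== LEMMAS AND PROOFS =====
lemma pvA_loop : ∀ (l : List String) (v1 v2 v3 v4 v5 v6 v7 v8 v9 v10 v11 v12 v13 v14 v15 : Int),
    l.foldl pvStepA (PySem.Dict.mk [("is_creature", v1), ("is_artifact", v2), ("is_enchantment", v3), ("is_instant", v4), ("is_land", v5), ("is_sorcery", v6), ("is_planeswalker", v7), ("is_battle", v8), ("is_conspiracy", v9), ("is_dungeon", v10), ("is_emblem", v11), ("is_phenomenon", v12), ("is_plane", v13), ("is_scheme", v14), ("is_vanguard", v15)]) =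
      PySem.Dict.mk [("is_creature", if "Creature" ∈ l then 1 else v1), ("is_artifact", if "Artifact" ∈ l then 1 else v2), ("is_enchantment", if "Enchantment" ∈ l then 1 else v3), ("is_instant", if "Instant" ∈ l then 1 else v4), ("is_land", if "Land" ∈ l then 1 else v5), ("is_sorcery", if "Sorcery" ∈ l then 1 else v6), ("is_planeswalker", if "Planeswalker" ∈ l then 1 else v7), ("is_battle", if "Battle" ∈ l then 1 else v8), ("is_conspiracy", if "Conspiracy" ∈ l then 1 else v9), ("is_dungeon", if "Dungeon" ∈ l then 1 else v10), ("is_emblem", if "Emblem" ∈ l then 1 else v11), ("is_phenomenon", if "Phenomenon" ∈ l then 1 else v12), ("is_plane", if "Plane" ∈ l then 1 else v13), ("is_scheme", if "Scheme" ∈ l then 1 else v14), ("is_vanguard", if "Vanguard" ∈ l then 1 else v15)] := by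
  intro l
  induction l with
  | nil => intro v1 v2 v3 v4 v5 v6 v7 v8 v9 v10 v11 v12 v13 v14 v15; simp
  | cons x l ih =>
    intro v1 v2 v3 v4 v5 v6 v7 v8 v9 v10 v11 v12 v13 v14 v15
    show l.foldl pvStepA (pvStepA _ x) = _
    by_cases hx1 : x = "Creature"
    · subst hx1
      have hstep : pvStepA (PySem.Dict.mk [("is_creature", v1), ("is_artifact", v2), ("is_enchantment", v3), ("is_instant", v4), ("is_land", v5), ("is_sorcery", v6), ("is_planeswalker", v7), ("is_battle", v8), ("is_conspiracy", v9), ("is_dungeon", v10), ("is_emblem", v11), ("is_phenomenon", v12), ("is_plane", v13), ("is_scheme", v14), ("is_vanguard", v15)]) "Creature" =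
          PySem.Dict.mk [("is_creature", 1), ("is_artifact", v2), ("is_enchantment", v3), ("is_instant", v4), ("is_land", v5), ("is_sorcery", v6), ("is_planeswalker", v7), ("is_battle", v8), ("is_conspiracy", v9), ("is_dungeon", v10), ("is_emblem", v11), ("is_phenomenon", v12), ("is_plane", v13), ("is_scheme", v14), ("is_vanguard", v15)] := by
        simp [pvStepA, pvTypeFlagMap, PySem.Dict.get?, PySem.Dict.insert]
      rw [hstep, ih]
      simp
    by_cases hx2 : x = "Artifact"
    · subst hx2
      have hstep : pvStepA (PySem.Dict.mk [("is_creature", v1), ("is_artifact", v2), ("is_enchantment", v3), ("is_instant", v4), ("is_land", v5), ("is_sorcery", v6), ("is_planeswalker", v7), ("is_battle", v8), ("is_conspiracy", v9), ("is_dungeon", v10), ("is_emblem", v11), ("is_phenomenon", v12), ("is_plane", v13), ("is_scheme", v14), ("is_vanguard", v15)]) "Artifact" =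
          PySem.Dict.mk [("is_creature", v1), ("is_artifact", 1), ("is_enchantment", v3), ("is_instant", v4), ("is_land", v5), ("is_sorcery", v6), ("is_planeswalker", v7), ("is_battle", v8), ("is_conspiracy", v9), ("is_dungeon", v10), ("is_emblem", v11), ("is_phenomenon", v12), ("is_plane", v13), ("is_scheme", v14), ("is_vanguard", v15)] := by
        simp [pvStepA, pvTypeFlagMap, PySem.Dict.get?, PySem.Dict.insert]
      rw [hstep, ih]
      simp
    by_cases hx3 : x = "Enchantment"
    · subst hx3
      have hstep : pvStepA (PySem.Dict.mk [("is_creature", v1), ("is_artifact", v2), ("is_enchantment", v3), ("is_instant", v4), ("is_land", v5), ("is_sorcery", v6), ("is_planeswalker", v7), ("is_battle", v8), ("is_conspiracy", v9), ("is_dungeon", v10), ("is_emblem", v11), ("is_phenomenon", v12), ("is_plane", v13), ("is_scheme", v14), ("is_vanguard", v15)]) "Enchantment" =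
          PySem.Dict.mk [("is_creature", v1), ("is_artifact", v2), ("is_enchantment", 1), ("is_instant", v4), ("is_land", v5), ("is_sorcery", v6), ("is_planeswalker", v7), ("is_battle", v8), ("is_conspiracy", v9), ("is_dungeon", v10), ("is_emblem", v11), ("is_phenomenon", v12), ("is_plane", v13), ("is_scheme", v14), ("is_vanguard", v15)] := by
        simp [pvStepA, pvTypeFlagMap, PySem.Dict.get?, PySem.Dict.insert]
      rw [hstep, ih]
      simp
    by_cases hx4 : x = "Instant"
    · subst hx4
      have hstep : pvStepA (PySem.Dict.mk [("is_creature", v1), ("is_artifact", v2), ("is_enchantment", v3), ("is_instant", v4), ("is_land", v5), ("is_sorcery", v6), ("is_planeswalker", v7), ("is_battle", v8), ("is_conspiracy", v9), ("is_dungeon", v10), ("is_emblem", v11), ("is_phenomenon", v12), ("is_plane", v13), ("is_scheme", v14), ("is_vanguard", v15)]) "Instant" =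
          PySem.Dict.mk [("is_creature", v1), ("is_artifact", v2), ("is_enchantment", v3), ("is_instant", 1), ("is_land", v5), ("is_sorcery", v6), ("is_planeswalker", v7), ("is_battle", v8), ("is_conspiracy", v9), ("is_dungeon", v10), ("is_emblem", v11), ("is_phenomenon", v12), ("is_plane", v13), ("is_scheme", v14), ("is_vanguard", v15)] := by
        simp [pvStepA, pvTypeFlagMap, PySem.Dict.get?, PySem.Dict.insert]
      rw [hstep, ih]
      simp
    by_cases hx5 : x = "Land"
    · subst hx5
      have hstep : pvStepA (PySem.Dict.mk [("is_creature", v1), ("is_artifact", v2), ("is_enchantment", v3), ("is_instant", v4), ("is_land", v5), ("is_sorcery", v6), ("is_planeswalker", v7), ("is_battle", v8), ("is_conspiracy", v9), ("is_dungeon", v10), ("is_emblem", v11), ("is_phenomenon", v12), ("is_plane", v13), ("is_scheme", v14), ("is_vanguard", v15)]) "Land" =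
          PySem.Dict.mk [("is_creature", v1), ("is_artifact", v2), ("is_enchantment", v3), ("is_instant", v4), ("is_land", 1), ("is_sorcery", v6), ("is_planeswalker", v7), ("is_battle", v8), ("is_conspiracy", v9), ("is_dungeon", v10), ("is_emblem", v11), ("is_phenomenon", v12), ("is_plane", v13), ("is_scheme", v14), ("is_vanguard", v15)] := by
        simp [pvStepA, pvTypeFlagMap, PySem.Dict.get?, PySem.Dict.insert]
      rw [hstep, ih]
      simp
    by_cases hx6 : x = "Sorcery"
    · subst hx6
      have hstep : pvStepA (PySem.Dict.mk [("is_creature", v1), ("is_artifact", v2), ("is_enchantment", v3), ("is_instant", v4), ("is_land", v5), ("is_sorcery", v6), ("is_planeswalker", v7), ("is_battle", v8), ("is_conspiracy", v9), ("is_dungeon", v10), ("is_emblem", v11), ("is_phenomenon", v12), ("is_plane", v13), ("is_scheme", v14), ("is_vanguard", v15)]) "Sorcery" =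
          PySem.Dict.mk [("is_creature", v1), ("is_artifact", v2), ("is_enchantment", v3), ("is_instant", v4), ("is_land", v5), ("is_sorcery", 1), ("is_planeswalker", v7), ("is_battle", v8), ("is_conspiracy", v9), ("is_dungeon", v10), ("is_emblem", v11), ("is_phenomenon", v12), ("is_plane", v13), ("is_scheme", v14), ("is_vanguard", v15)] := by
        simp [pvStepA, pvTypeFlagMap, PySem.Dict.get?, PySem.Dict.insert]
      rw [hstep, ih]
      simp
    by_cases hx7 : x = "Planeswalker"
    · subst hx7
      have hstep : pvStepA (PySem.Dict.mk [("is_creature", v1), ("is_artifact", v2), ("is_enchantment", v3), ("is_instant", v4), ("is_land", v5), ("is_sorcery", v6), ("is_planeswalker", v7), ("is_battle", v8), ("is_conspiracy", v9), ("is_dungeon", v10), ("is_emblem", v11), ("is_phenomenon", v12), ("is_plane", v13), ("is_scheme", v14), ("is_vanguard", v15)]) "Planeswalker" =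
          PySem.Dict.mk [("is_creature", v1), ("is_artifact", v2), ("is_enchantment", v3), ("is_instant", v4), ("is_land", v5), ("is_sorcery", v6), ("is_planeswalker", 1), ("is_battle", v8), ("is_conspiracy", v9), ("is_dungeon", v10), ("is_emblem", v11), ("is_phenomenon", v12), ("is_plane", v13), ("is_scheme", v14), ("is_vanguard", v15)] := by
        simp [pvStepA, pvTypeFlagMap, PySem.Dict.get?, PySem.Dict.insert]
      rw [hstep, ih]
      simp
    by_cases hx8 : x = "Battle"
    · subst hx8
      have hstep : pvStepA (PySem.Dict.mk [("is_creature", v1), ("is_artifact", v2), ("is_enchantment", v3), ("is_instant", v4), ("is_land", v5), ("is_sorcery", v6), ("is_planeswalker", v7), ("is_battle", v8), ("is_conspiracy", v9), ("is_dungeon", v10), ("is_emblem", v11), ("is_phenomenon", v12), ("is_plane", v13), ("is_scheme", v14), ("is_vanguard", v15)]) "Battle" =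
          PySem.Dict.mk [("is_creature", v1), ("is_artifact", v2), ("is_enchantment", v3), ("is_instant", v4), ("is_land", v5), ("is_sorcery", v6), ("is_planeswalker", v7), ("is_battle", 1), ("is_conspiracy", v9), ("is_dungeon", v10), ("is_emblem", v11), ("is_phenomenon", v12), ("is_plane", v13), ("is_scheme", v14), ("is_vanguard", v15)] := by
        simp [pvStepA, pvTypeFlagMap, PySem.Dict.get?, PySem.Dict.insert]
      rw [hstep, ih]
      simp
    by_cases hx9 : x = "Conspiracy"
    · subst hx9
      have hstep : pvStepA (PySem.Dict.mk [("is_creature", v1), ("is_artifact", v2), ("is_enchantment", v3), ("is_instant", v4), ("is_land", v5), ("is_sorcery", v6), ("is_planeswalker", v7), ("is_battle", v8), ("is_conspiracy", v9), ("is_dungeon", v10), ("is_emblem", v11), ("is_phenomenon", v12), ("is_plane", v13), ("is_scheme", v14), ("is_vanguard", v15)]) "Conspiracy" =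
          PySem.Dict.mk [("is_creature", v1), ("is_artifact", v2), ("is_enchantment", v3), ("is_instant", v4), ("is_land", v5), ("is_sorcery", v6), ("is_planeswalker", v7), ("is_battle", v8), ("is_conspiracy", 1), ("is_dungeon", v10), ("is_emblem", v11), ("is_phenomenon", v12), ("is_plane", v13), ("is_scheme", v14), ("is_vanguard", v15)] := by
        simp [pvStepA, pvTypeFlagMap, PySem.Dict.get?, PySem.Dict.insert]
      rw [hstep, ih]
      simp
    by_cases hx10 : x = "Dungeon"
    · subst hx10
      have hstep : pvStepA (PySem.Dict.mk [("is_creature", v1), ("is_artifact", v2), ("is_enchantment", v3), ("is_instant", v4), ("is_land", v5), ("is_sorcery", v6), ("is_planeswalker", v7), ("is_battle", v8), ("is_conspiracy", v9), ("is_dungeon", v10), ("is_emblem", v11), ("is_phenomenon", v12), ("is_plane", v13), ("is_scheme", v14), ("is_vanguard", v15)]) "Dungeon" =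
          PySem.Dict.mk [("is_creature", v1), ("is_artifact", v2), ("is_enchantment", v3), ("is_instant", v4), ("is_land", v5), ("is_sorcery", v6), ("is_planeswalker", v7), ("is_battle", v8), ("is_conspiracy", v9), ("is_dungeon", 1), ("is_emblem", v11), ("is_phenomenon", v12), ("is_plane", v13), ("is_scheme", v14), ("is_vanguard", v15)] := by
        simp [pvStepA, pvTypeFlagMap, PySem.Dict.get?, PySem.Dict.insert]
      rw [hstep, ih]
      simp
    by_cases hx11 : x = "Emblem"
    · subst hx11
      have hstep : pvStepA (PySem.Dict.mk [("is_creature", v1), ("is_artifact", v2), ("is_enchantment", v3), ("is_instant", v4), ("is_land", v5), ("is_sorcery", v6), ("is_planeswalker", v7), ("is_battle", v8), ("is_conspiracy", v9), ("is_dungeon", v10), ("is_emblem", v11), ("is_phenomenon", v12), ("is_plane", v13), ("is_scheme", v14), ("is_vanguard", v15)]) "Emblem" =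
          PySem.Dict.mk [("is_creature", v1), ("is_artifact", v2), ("is_enchantment", v3), ("is_instant", v4), ("is_land", v5), ("is_sorcery", v6), ("is_planeswalker", v7), ("is_battle", v8), ("is_conspiracy", v9), ("is_dungeon", v10), ("is_emblem", 1), ("is_phenomenon", v12), ("is_plane", v13), ("is_scheme", v14), ("is_vanguard", v15)] := by
        simp [pvStepA, pvTypeFlagMap, PySem.Dict.get?, PySem.Dict.insert]
      rw [hstep, ih]
      simp
    by_cases hx12 : x = "Phenomenon"
    · subst hx12
      have hstep : pvStepA (PySem.Dict.mk [("is_creature", v1), ("is_artifact", v2), ("is_enchantment", v3), ("is_instant", v4), ("is_land", v5), ("is_sorcery", v6), ("is_planeswalker", v7), ("is_battle", v8), ("is_conspiracy", v9), ("is_dungeon", v10), ("is_emblem", v11), ("is_phenomenon", v12), ("is_plane", v13), ("is_scheme", v14), ("is_vanguard", v15)]) "Phenomenon" =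
          PySem.Dict.mk [("is_creature", v1), ("is_artifact", v2), ("is_enchantment", v3), ("is_instant", v4), ("is_land", v5), ("is_sorcery", v6), ("is_planeswalker", v7), ("is_battle", v8), ("is_conspiracy", v9), ("is_dungeon", v10), ("is_emblem", v11), ("is_phenomenon", 1), ("is_plane", v13), ("is_scheme", v14), ("is_vanguard", v15)] := by
        simp [pvStepA, pvTypeFlagMap, PySem.Dict.get?, PySem.Dict.insert]
      rw [hstep, ih]
      simp
    by_cases hx13 : x = "Plane"
    · subst hx13
      have hstep : pvStepA (PySem.Dict.mk [("is_creature", v1), ("is_artifact", v2), ("is_enchantment", v3), ("is_instant", v4), ("is_land", v5), ("is_sorcery", v6), ("is_planeswalker", v7), ("is_battle", v8), ("is_conspiracy", v9), ("is_dungeon", v10), ("is_emblem", v11), ("is_phenomenon", v12), ("is_plane", v13), ("is_scheme", v14), ("is_vanguard", v15)]) "Plane" =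
          PySem.Dict.mk [("is_creature", v1), ("is_artifact", v2), ("is_enchantment", v3), ("is_instant", v4), ("is_land", v5), ("is_sorcery", v6), ("is_planeswalker", v7), ("is_battle", v8), ("is_conspiracy", v9), ("is_dungeon", v10), ("is_emblem", v11), ("is_phenomenon", v12), ("is_plane", 1), ("is_scheme", v14), ("is_vanguard", v15)] := by
        simp [pvStepA, pvTypeFlagMap, PySem.Dict.get?, PySem.Dict.insert]
      rw [hstep, ih]
      simp
    by_cases hx14 : x = "Scheme"
    · subst hx14
      have hstep : pvStepA (PySem.Dict.mk [("is_creature", v1), ("is_artifact", v2), ("is_enchantment", v3), ("is_instant", v4), ("is_land", v5), ("is_sorcery", v6), ("is_planeswalker", v7), ("is_battle", v8), ("is_conspiracy", v9), ("is_dungeon", v10), ("is_emblem", v11), ("is_phenomenon", v12), ("is_plane", v13), ("is_scheme", v14), ("is_vanguard", v15)]) "Scheme" =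
          PySem.Dict.mk [("is_creature", v1), ("is_artifact", v2), ("is_enchantment", v3), ("is_instant", v4), ("is_land", v5), ("is_sorcery", v6), ("is_planeswalker", v7), ("is_battle", v8), ("is_conspiracy", v9), ("is_dungeon", v10), ("is_emblem", v11), ("is_phenomenon", v12), ("is_plane", v13), ("is_scheme", 1), ("is_vanguard", v15)] := by
        simp [pvStepA, pvTypeFlagMap, PySem.Dict.get?, PySem.Dict.insert]
      rw [hstep, ih]
      simp
    by_cases hx15 : x = "Vanguard"
    · subst hx15
      have hstep : pvStepA (PySem.Dict.mk [("is_creature", v1), ("is_artifact", v2), ("is_enchantment", v3), ("is_instant", v4), ("is_land", v5), ("is_sorcery", v6), ("is_planeswalker", v7), ("is_battle", v8), ("is_conspiracy", v9), ("is_dungeon", v10), ("is_emblem", v11), ("is_phenomenon", v12), ("is_plane", v13), ("is_scheme", v14), ("is_vanguard", v15)]) "Vanguard" =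
          PySem.Dict.mk [("is_creature", v1), ("is_artifact", v2), ("is_enchantment", v3), ("is_instant", v4), ("is_land", v5), ("is_sorcery", v6), ("is_planeswalker", v7), ("is_battle", v8), ("is_conspiracy", v9), ("is_dungeon", v10), ("is_emblem", v11), ("is_phenomenon", v12), ("is_plane", v13), ("is_scheme", v14), ("is_vanguard", 1)] := by
        simp [pvStepA, pvTypeFlagMap, PySem.Dict.get?, PySem.Dict.insert]
      rw [hstep, ih]
      simp
    have hnone : pvTypeFlagMap.get? x = none := by
      simp [pvTypeFlagMap, PySem.Dict.get?, Ne.symm hx1, Ne.symm hx2, Ne.symm hx3, Ne.symm hx4, Ne.symm hx5, Ne.symm hx6, Ne.symm hx7, Ne.symm hx8, Ne.symm hx9, Ne.symm hx10, Ne.symm hx11, Ne.symm hx12, Ne.symm hx13, Ne.symm hx14, Ne.symm hx15]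
    have hstep : pvStepA (PySem.Dict.mk [("is_creature", v1), ("is_artifact", v2), ("is_enchantment", v3), ("is_instant", v4), ("is_land", v5), ("is_sorcery", v6), ("is_planeswalker", v7), ("is_battle", v8), ("is_conspiracy", v9), ("is_dungeon", v10), ("is_emblem", v11), ("is_phenomenon", v12), ("is_plane", v13), ("is_scheme", v14), ("is_vanguard", v15)]) x =
        PySem.Dict.mk [("is_creature", v1), ("is_artifact", v2), ("is_enchantment", v3), ("is_instant", v4), ("is_land", v5), ("is_sorcery", v6), ("is_planeswalker", v7), ("is_battle", v8), ("is_conspiracy", v9), ("is_dungeon", v10), ("is_emblem", v11), ("is_phenomenon", v12), ("is_plane", v13), ("is_scheme", v14), ("is_vanguard", v15)] := by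
      simp [pvStepA, hnone]
    rw [hstep, ih]
    simp [List.mem_cons, Ne.symm hx1, Ne.symm hx2, Ne.symm hx3, Ne.symm hx4, Ne.symm hx5, Ne.symm hx6, Ne.symm hx7, Ne.symm hx8, Ne.symm hx9, Ne.symm hx10, Ne.symm hx11, Ne.symm hx12, Ne.symm hx13, Ne.symm hx14, Ne.symm hx15]

-- ===== VERDICT (by name: the statement is the Claim_ definition above) =====
theorem build_type_flags_spec : Claim_equal_build_type_flags := by
  intro card_types _
  unfold Spec_build_type_flags build_type_flags build_type_flags_alt pvInitFlags
  rw [pvA_loop]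
  simp [pvTypeFlagPairs, PySem.Set.mem_ofList]
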